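-- pv_equiv track=rewrite | github.com/RuleIQ-Vercel-Deploy/ruleIQ | services/ai/regulation_tools.py | _generate_compliance_timeline
-- ===== SOURCE A (Python) =====
-- from typing import Any, Dict, List, Optional
--
-- def _generate_compliance_timeline(
--     regulations: List[Dict[str, Any]]
-- ) -> Dict[str, List[str]]:
--     """Generate recommended compliance timeline"""
--     timeline = {
--         "immediate": [],  # 0-30 days
--         "short_term": [],  # 1-3 months
--         "medium_term": [],  # 3-6 months
--         "long_term": [],  # 6+ months
--     }
--
--     for reg in regulations:
--         reg_name = reg.get("regulation", "Unknown")
--         priority = reg.get("priority", "medium")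
--
--         if priority == "critical":
--             timeline["immediate"].append(f"Begin {reg_name} compliance assessment")
--         elif priority == "high":
--             timeline["short_term"].append(f"Implement {reg_name} requirements")
--         elif priority == "medium":
--             timeline["medium_term"].append(f"Address {reg_name} compliance")
--         else:
--             timeline["long_term"].append(f"Review {reg_name} applicability")
--
--     return timeline
-- ===== SOURCE B (Python) =====
-- from typing import Any, Dict, List
--
-- def _generate_compliance_timeline(
--     regulations: List[Dict[str, Any]]
-- ) -> Dict[str, List[str]]:
--     """Generate recommended compliance timeline (bucket-per-pass dispatch form)."""
--     bucket_of = {"critical": "immediate", "high": "short_term", "medium": "medium_term"}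
--     templates = {
--         "immediate": ("Begin ", " compliance assessment"),
--         "short_term": ("Implement ", " requirements"),
--         "medium_term": ("Address ", " compliance"),
--         "long_term": ("Review ", " applicability"),
--     }
--
--     def bucket(reg):
--         return bucket_of.get(reg.get("priority", "medium"), "long_term")
--
--     return {
--         b: [pre + reg.get("regulation", "Unknown") + post
--             for reg in regulations if bucket(reg) == b]
--         for b, (pre, post) in templates.items()
--     }
-- ===== Notes on version B (the rewrite author's own statement) =====
-- stated objective: idiomatic
-- what changed: Replaces the if/elif chain that appends into a mutable dict with a dispatch-dict bucket classifier and a dict comprehension building each of the four buckets by its own filter-and-format pass.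
import Mathlib
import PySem

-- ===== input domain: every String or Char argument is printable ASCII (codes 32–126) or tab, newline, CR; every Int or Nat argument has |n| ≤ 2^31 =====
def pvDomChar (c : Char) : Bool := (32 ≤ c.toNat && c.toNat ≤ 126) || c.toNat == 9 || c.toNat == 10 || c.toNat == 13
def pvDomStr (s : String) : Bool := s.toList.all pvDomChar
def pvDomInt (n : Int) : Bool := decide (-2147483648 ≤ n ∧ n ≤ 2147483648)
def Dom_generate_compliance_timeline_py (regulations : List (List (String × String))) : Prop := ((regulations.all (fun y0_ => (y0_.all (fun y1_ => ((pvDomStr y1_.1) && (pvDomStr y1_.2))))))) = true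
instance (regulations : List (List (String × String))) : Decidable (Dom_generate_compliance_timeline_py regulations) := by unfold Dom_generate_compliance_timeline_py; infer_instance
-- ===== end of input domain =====

-- B rewrites the if/elif/append loop as a dispatch-dict classifier plus one filter+format comprehension per bucket (idiomatic, same cost).
-- ===== PORT A =====
def pvStepA (timeline : PySem.Dict String (List String)) (reg : List (String × String)) : PySem.Dict String (List String) :=
  let reg_name := PySem.Dict.getD (PySem.Dict.mk reg) "regulation" "Unknown"
  let priority := PySem.Dict.getD (PySem.Dict.mk reg) "priority" "medium"
  if priority = "critical" then
    timeline.modify "immediate" [] (fun xs => xs ++ ["Begin " ++ reg_name ++ " compliance assessment"])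
  else if priority = "high" then
    timeline.modify "short_term" [] (fun xs => xs ++ ["Implement " ++ reg_name ++ " requirements"])
  else if priority = "medium" then
    timeline.modify "medium_term" [] (fun xs => xs ++ ["Address " ++ reg_name ++ " compliance"])
  else
    timeline.modify "long_term" [] (fun xs => xs ++ ["Review " ++ reg_name ++ " applicability"])

def generate_compliance_timeline_py (regulations : List (List (String × String))) : List (String × List String) :=
  let timeline : PySem.Dict String (List String) :=
    PySem.Dict.ofList [("immediate", []), ("short_term", []), ("medium_term", []), ("long_term", [])]
  (regulations.foldl pvStepA timeline).items


-- ===== PORT B =====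
def pvAltBucket (reg : List (String × String)) : String :=
  PySem.Dict.getD
    (PySem.Dict.mk [("critical", "immediate"), ("high", "short_term"), ("medium", "medium_term")])
    (PySem.Dict.getD (PySem.Dict.mk reg) "priority" "medium") "long_term"

def pvAltTemplates : List (String × String × String) :=
  (PySem.Dict.ofList
    [("immediate", ("Begin ", " compliance assessment")),
     ("short_term", ("Implement ", " requirements")),
     ("medium_term", ("Address ", " compliance")),
     ("long_term", ("Review ", " applicability"))]).items

def generate_compliance_timeline_py_alt (regulations : List (List (String × String))) : List (String × List String) :=
  pvAltTemplates.map (fun bt =>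
    (bt.1,
     (regulations.filter (fun reg => pvAltBucket reg = bt.1)).map
       (fun reg => bt.2.1 ++ PySem.Dict.getD (PySem.Dict.mk reg) "regulation" "Unknown" ++ bt.2.2)))


-- ===== PRECONDITION & SPEC =====
def Spec_generate_compliance_timeline_py (regulations : List (List (String × String))) (out : List (String × List String)) : Prop := out = generate_compliance_timeline_py_alt regulations
instance (regulations : List (List (String × String))) (out : List (String × List String)) : Decidable (Spec_generate_compliance_timeline_py regulations out) := by unfold Spec_generate_compliance_timeline_py; infer_instance

-- ===== CLAIM (what is proved, stated in full; the proofs are below) =====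
def Claim_equal_generate_compliance_timeline_py : Prop := ∀ (regulations : List (List (String × String))), Dom_generate_compliance_timeline_py regulations → Spec_generate_compliance_timeline_py regulations (generate_compliance_timeline_py regulations)

-- ===== LEMMAS AND PROOFS =====

def pvMsgs (b pre post : String) (regs : List (List (String × String))) : List String :=
  (regs.filter (fun reg => pvAltBucket reg = b)).map
    (fun reg => pre ++ PySem.Dict.getD (PySem.Dict.mk reg) "regulation" "Unknown" ++ post)

theorem pvFoldl_items (regs : List (List (String × String))) (i s m l : List String) :
    (regs.foldl pvStepA (PySem.Dict.mk
        [("immediate", i), ("short_term", s), ("medium_term", m), ("long_term", l)])).items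
    = [("immediate", i ++ pvMsgs "immediate" "Begin " " compliance assessment" regs),
       ("short_term", s ++ pvMsgs "short_term" "Implement " " requirements" regs),
       ("medium_term", m ++ pvMsgs "medium_term" "Address " " compliance" regs),
       ("long_term", l ++ pvMsgs "long_term" "Review " " applicability" regs)] := by
  induction regs generalizing i s m l with
  | nil => simp [pvMsgs]
  | cons reg rest ih =>
    simp only [List.foldl_cons]
    have hb : pvAltBucket reg =
        (if PySem.Dict.getD (PySem.Dict.mk reg) "priority" "medium" = "critical" then "immediate"
         else if PySem.Dict.getD (PySem.Dict.mk reg) "priority" "medium" = "high" then "short_term"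
         else if PySem.Dict.getD (PySem.Dict.mk reg) "priority" "medium" = "medium" then "medium_term"
         else "long_term") := by
      simp only [pvAltBucket]
      generalize PySem.Dict.getD (PySem.Dict.mk reg) "priority" "medium" = p
      split_ifs with h1 h2 h3 <;>
        simp [PySem.Dict.getD, PySem.Dict.get?_mk_cons, *] <;>
        simp [PySem.Dict.get?, eq_comm, *]
    by_cases h1 : PySem.Dict.getD (PySem.Dict.mk reg) "priority" "medium" = "critical"
    · rw [show pvStepA (PySem.Dict.mk
          [("immediate", i), ("short_term", s), ("medium_term", m), ("long_term", l)]) reg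
          = PySem.Dict.mk [("immediate", i ++ ["Begin " ++ PySem.Dict.getD (PySem.Dict.mk reg) "regulation" "Unknown" ++ " compliance assessment"]),
              ("short_term", s), ("medium_term", m), ("long_term", l)] by
            simp only [pvStepA, h1]
            simp [PySem.Dict.modify, PySem.Dict.getD, PySem.Dict.get?_mk_cons,
              PySem.Dict.contains, PySem.Dict.insert]]
      rw [ih]
      simp [pvMsgs, List.filter_cons, hb, h1]
    · by_cases h2 : PySem.Dict.getD (PySem.Dict.mk reg) "priority" "medium" = "high"
      · rw [show pvStepA (PySem.Dict.mk
            [("immediate", i), ("short_term", s), ("medium_term", m), ("long_term", l)]) reg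
            = PySem.Dict.mk [("immediate", i),
                ("short_term", s ++ ["Implement " ++ PySem.Dict.getD (PySem.Dict.mk reg) "regulation" "Unknown" ++ " requirements"]),
                ("medium_term", m), ("long_term", l)] by
              simp only [pvStepA, h1, h2]
              simp [PySem.Dict.modify, PySem.Dict.getD, PySem.Dict.get?_mk_cons,
                PySem.Dict.contains, PySem.Dict.insert]]
        rw [ih]
        simp [pvMsgs, hb, h1, h2]
      · by_cases h3 : PySem.Dict.getD (PySem.Dict.mk reg) "priority" "medium" = "medium"
        · rw [show pvStepA (PySem.Dict.mk
              [("immediate", i), ("short_term", s), ("medium_term", m), ("long_term", l)]) reg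
              = PySem.Dict.mk [("immediate", i), ("short_term", s),
                  ("medium_term", m ++ ["Address " ++ PySem.Dict.getD (PySem.Dict.mk reg) "regulation" "Unknown" ++ " compliance"]),
                  ("long_term", l)] by
                simp only [pvStepA, h1, h2, h3]
                simp [PySem.Dict.modify, PySem.Dict.getD, PySem.Dict.get?_mk_cons,
                  PySem.Dict.contains, PySem.Dict.insert]]
          rw [ih]
          simp [pvMsgs, hb, h1, h2, h3]
        · rw [show pvStepA (PySem.Dict.mk
              [("immediate", i), ("short_term", s), ("medium_term", m), ("long_term", l)]) reg
              = PySem.Dict.mk [("immediate", i), ("short_term", s), ("medium_term", m),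
                  ("long_term", l ++ ["Review " ++ PySem.Dict.getD (PySem.Dict.mk reg) "regulation" "Unknown" ++ " applicability"])] by
                simp only [pvStepA]
                rw [if_neg h1, if_neg h2, if_neg h3]
                simp [PySem.Dict.modify, PySem.Dict.getD, PySem.Dict.get?_mk_cons,
                  PySem.Dict.contains, PySem.Dict.insert]]
          rw [ih]
          simp [pvMsgs, hb, h1, h2, h3]

-- ===== VERDICT =====
theorem generate_compliance_timeline_py_spec : Claim_equal_generate_compliance_timeline_py := by
  intro regulations _
  unfold Spec_generate_compliance_timeline_py
  show generate_compliance_timeline_py regulations = generate_compliance_timeline_py_alt regulations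
  have hinit : (PySem.Dict.ofList
      [("immediate", ([] : List String)), ("short_term", []), ("medium_term", []), ("long_term", [])])
      = PySem.Dict.mk [("immediate", []), ("short_term", []), ("medium_term", []), ("long_term", [])] := by
    decide
  simp only [generate_compliance_timeline_py, hinit, pvFoldl_items, List.nil_append]
  simp [generate_compliance_timeline_py_alt, pvAltTemplates, pvMsgs, PySem.Dict.items,
    PySem.Dict.ofList, PySem.Dict.update, PySem.Dict.insert, PySem.Dict.contains, PySem.Dict.empty]
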